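-- pv_equiv track=rewrite | github.com/OnurAkyar/Cosmos-YKS2026 | CPT_Dataset_Hazırlama/formatter/tokenize_and_pack.py | pack_token_stream
-- ===== SOURCE A (Python) =====
-- from typing import Generator
--
-- def pack_token_stream(
--     token_stream: Generator[int, None, None],
--     max_seq_len: int,
-- ) -> list[dict]:
--     """
--     Consume a flat stream of token ids and yield fixed-length chunks.
--
--     Each chunk becomes one training example.
--     labels = input_ids (standard causal LM objective).
--     The last incomplete chunk is dropped to keep all lengths equal.
--     """
--     buffer = []
--     packed = []
--
--     for token_id in token_stream:
--         buffer.append(token_id)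
--         if len(buffer) == max_seq_len:
--             packed.append({
--                 "input_ids": buffer,
--                 "labels":    buffer.copy(),
--             })
--             buffer = []
--
--     # Drop the final incomplete chunk — uneven lengths break packing efficiency
--     dropped = len(buffer)
--     return packed, dropped
-- ===== SOURCE B (Python) =====
-- def pack_token_stream(token_stream, max_seq_len):
--     tokens = list(token_stream)
--     n = len(tokens)
--     if max_seq_len <= 0:
--         # nothing can ever fill a non-positive-length chunk: everything is dropped
--         return [], n
--     num_chunks = n // max_seq_len
--     packed = [
--         {
--             "input_ids": tokens[i * max_seq_len:(i + 1) * max_seq_len],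
--             "labels": tokens[i * max_seq_len:(i + 1) * max_seq_len],
--         }
--         for i in range(num_chunks)
--     ]
--     return packed, n - num_chunks * max_seq_len
-- ===== Notes on version B (the rewrite author's own statement) =====
-- stated objective: alternative
-- what changed: Replaces the per-token streaming append/length-check loop with a single index-driven slicing pass: materialize the stream, compute the chunk count by integer division, and build each chunk as a list slice.
import Mathlib
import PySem

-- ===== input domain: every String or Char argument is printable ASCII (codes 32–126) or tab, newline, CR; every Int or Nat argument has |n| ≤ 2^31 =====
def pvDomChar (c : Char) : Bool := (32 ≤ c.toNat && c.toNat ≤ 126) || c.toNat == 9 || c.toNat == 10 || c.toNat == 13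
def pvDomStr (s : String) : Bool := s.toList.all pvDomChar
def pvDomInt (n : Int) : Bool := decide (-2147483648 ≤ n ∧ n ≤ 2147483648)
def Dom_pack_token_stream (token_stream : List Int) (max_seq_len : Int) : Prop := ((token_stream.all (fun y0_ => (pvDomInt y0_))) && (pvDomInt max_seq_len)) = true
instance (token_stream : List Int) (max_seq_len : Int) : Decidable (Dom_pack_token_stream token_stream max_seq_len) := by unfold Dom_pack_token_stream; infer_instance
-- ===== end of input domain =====

-- B replaces A's per-token streaming append/length-check loop with an index-driven
-- slicing pass (chunk count by integer division, each chunk a slice); same cost, different decomposition.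

-- ===== PORT A =====
-- loop body of A's 'for token_id in token_stream': append to buffer, flush a full buffer
def pvStepA (max_seq_len : Int) (s : List Int × List (List (String × List Int))) (token_id : Int) :
    List Int × List (List (String × List Int)) :=
  let buffer := s.1 ++ [token_id]
  if (buffer.length : Int) = max_seq_len then
    ([], s.2 ++ [[("input_ids", buffer), ("labels", buffer)]])
  else
    (buffer, s.2)

def pack_token_stream (token_stream : List Int) (max_seq_len : Int) : (List (List (String × List Int))) × Int :=
  let st := token_stream.foldl (pvStepA max_seq_len) ([], [])
  (st.2, (st.1.length : Int))

-- ===== PORT B =====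
def pack_token_stream_alt (token_stream : List Int) (max_seq_len : Int) : (List (List (String × List Int))) × Int :=
  let n : Int := token_stream.length
  if max_seq_len ≤ 0 then
    ([], n)
  else
    let num_chunks := PySem.Int.floordiv n max_seq_len
    let packed := (PySem.List.pyRange 0 num_chunks 1).map (fun i =>
      let chunk := PySem.List.slice token_stream (some (i * max_seq_len)) (some ((i + 1) * max_seq_len))
      [("input_ids", chunk), ("labels", chunk)])
    (packed, n - num_chunks * max_seq_len)

-- ===== PRECONDITION & SPEC =====
def Spec_pack_token_stream (token_stream : List Int) (max_seq_len : Int) (out : (List (List (String × List Int))) × Int) : Prop := out = pack_token_stream_alt token_stream max_seq_len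
instance (token_stream : List Int) (max_seq_len : Int) (out : (List (List (String × List Int))) × Int) : Decidable (Spec_pack_token_stream token_stream max_seq_len out) := by unfold Spec_pack_token_stream; infer_instance

-- ===== CLAIM (what is proved, stated in full; the proofs are below) =====
def Claim_equal_pack_token_stream : Prop := ∀ (token_stream : List Int) (max_seq_len : Int), Dom_pack_token_stream token_stream max_seq_len → Spec_pack_token_stream token_stream max_seq_len (pack_token_stream token_stream max_seq_len)

-- ===== LEMMAS AND PROOFS =====

-- middle spec: the chunks and the leftover tail, by structural recursion
def packRec (l : Nat) (xs : List Int) : List (List Int) × List Int :=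
  if _h : l = 0 ∨ xs.length < l then ([], xs)
  else
    let r := packRec l (xs.drop l)
    (xs.take l :: r.1, r.2)
termination_by xs.length
decreasing_by simp only [List.length_drop]; omega

def pvWrap (c : List Int) : List (String × List Int) := [("input_ids", c), ("labels", c)]

lemma packRec_of_lt {l : Nat} {xs : List Int} (h : xs.length < l) : packRec l xs = ([], xs) := by
  rw [packRec]; simp [h]

lemma packRec_cons {l : Nat} {c xs : List Int} (hc : c.length = l) (hl : 0 < l) :
    packRec l (c ++ xs) = (c :: (packRec l xs).1, (packRec l xs).2) := by
  rw [packRec]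
  have hlen : (c ++ xs).length = l + xs.length := by simp [hc]
  rw [dif_neg (by omega)]
  simp [List.drop_left' hc, List.take_left' hc]

lemma pvStepA_full {l : Nat} {buf : List Int} {packed : List (List (String × List Int))} {t : Int}
    (hfull : buf.length + 1 = l) :
    pvStepA (l : Int) (buf, packed) t = ([], packed ++ [pvWrap (buf ++ [t])]) := by
  unfold pvStepA pvWrap
  rw [if_pos (by simp only [List.length_append, List.length_cons, List.length_nil]; push_cast; omega)]

lemma pvStepA_notfull {l : Nat} {buf : List Int} {packed : List (List (String × List Int))} {t : Int}
    (hne : buf.length + 1 ≠ l) :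
    pvStepA (l : Int) (buf, packed) t = (buf ++ [t], packed) := by
  unfold pvStepA
  rw [if_neg (by simp only [List.length_append, List.length_cons, List.length_nil]; push_cast; omega)]

-- A's loop, started on any partial buffer, computes packRec
lemma loopA_eq (l : Nat) (hl : 0 < l) :
    ∀ (ts buf : List Int) (packed : List (List (String × List Int))), buf.length < l →
    ts.foldl (pvStepA (l : Int)) (buf, packed)
    = ((packRec l (buf ++ ts)).2, packed ++ (packRec l (buf ++ ts)).1.map pvWrap) := by
  intro ts
  induction ts with
  | nil =>
    intro buf packed hb
    simp [packRec_of_lt hb]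
  | cons t ts ih =>
    intro buf packed hb
    simp only [List.foldl_cons]
    by_cases hfull : buf.length + 1 = l
    · rw [pvStepA_full hfull, ih [] (packed ++ [pvWrap (buf ++ [t])]) hl]
      have hkey : buf ++ t :: ts = (buf ++ [t]) ++ ts := by simp
      rw [hkey, packRec_cons (c := buf ++ [t]) (by simp; omega) hl]
      simp
    · rw [pvStepA_notfull hfull, ih (buf ++ [t]) packed (by simp; omega)]
      simp

lemma packRec_fst (l : Nat) (hl : 0 < l) :
    ∀ (xs : List Int),
    (packRec l xs).1 = (List.range (xs.length / l)).map (fun i => (xs.drop (i * l)).take l) := by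
  intro xs
  induction hn : xs.length using Nat.strong_induction_on generalizing xs with
  | _ n ih =>
    subst hn
    by_cases h : xs.length < l
    · rw [packRec_of_lt h, Nat.div_eq_of_lt h]; simp
    · rw [Nat.not_lt] at h
      have hdl : (xs.drop l).length = xs.length - l := by simp
      have hd : xs.length / l = (xs.drop l).length / l + 1 := by
        rw [hdl]; exact Nat.div_eq_sub_div hl h
      have ihd := ih (xs.drop l).length (by rw [hdl]; omega) (xs.drop l) rfl
      have hproj : (packRec l xs).1 = xs.take l :: (packRec l (xs.drop l)).1 := by
        rw [packRec, dif_neg (by omega)]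
      rw [hproj, hd, List.range_succ_eq_map, List.map_cons, List.map_map]
      refine List.cons_eq_cons.mpr ⟨by simp, ?_⟩
      rw [ihd]
      apply List.map_congr_left
      intro i _
      simp only [Function.comp_apply, List.drop_drop]
      congr 2
      rw [Nat.succ_mul, Nat.add_comm]

lemma packRec_snd (l : Nat) (hl : 0 < l) :
    ∀ (xs : List Int), (packRec l xs).2.length = xs.length % l := by
  intro xs
  induction hn : xs.length using Nat.strong_induction_on generalizing xs with
  | _ n ih =>
    subst hn
    by_cases h : xs.length < l
    · rw [packRec_of_lt h, Nat.mod_eq_of_lt h]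
    · rw [Nat.not_lt] at h
      have hdl : (xs.drop l).length = xs.length - l := by simp
      have hproj : (packRec l xs).2 = (packRec l (xs.drop l)).2 := by
        rw [packRec, dif_neg (by omega)]
      rw [hproj, ih (xs.drop l).length (by rw [hdl]; omega) (xs.drop l) rfl, hdl,
        Nat.mod_eq_sub_mod h]

-- A's flush condition never fires when max_seq_len ≤ 0: the buffer just grows
lemma loopA_nonpos (L : Int) (hL : L ≤ 0) :
    ∀ (ts buf : List Int) (packed : List (List (String × List Int))),
    ts.foldl (pvStepA L) (buf, packed) = (buf ++ ts, packed) := by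
  intro ts
  induction ts with
  | nil => intro buf packed; simp
  | cons t ts ih =>
    intro buf packed
    simp only [List.foldl_cons]
    rw [show pvStepA L (buf, packed) t = (buf ++ [t], packed) by
      unfold pvStepA
      rw [if_neg (by simp only [List.length_append, List.length_cons, List.length_nil]; push_cast; omega)]]
    rw [ih]
    simp

-- each of B's slices is a drop/take chunk
lemma pvChunkSlice (ts : List Int) (l k : Nat) :
    PySem.List.slice ts (some ((k : Int) * (l : Int))) (some (((k : Int) + 1) * (l : Int)))
      = (ts.drop (k * l)).take l := by
  have h1 : (k : Int) * (l : Int) = ((k * l : Nat) : Int) := by push_cast; ring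
  have h2 : ((k : Int) + 1) * (l : Int) = ((k * l : Nat) : Int) + ((l : Nat) : Int) := by
    push_cast; ring
  rw [h1, h2, PySem.List.slice_natCast_add]

-- ===== VERDICT (by name: the statement is the Claim_ definition above) =====
theorem pack_token_stream_spec : Claim_equal_pack_token_stream := by
  intro ts L _
  unfold Spec_pack_token_stream pack_token_stream pack_token_stream_alt
  by_cases hL : L ≤ 0
  · rw [if_pos hL, loopA_nonpos L hL ts [] []]
    simp
  · rw [not_le] at hL
    rw [if_neg (by omega)]
    set l := L.toNat with hl'
    have hLl : L = (l : Int) := by omega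
    have hl : 0 < l := by omega
    rw [hLl, loopA_eq l hl ts [] [] hl]
    simp only [List.nil_append]
    have hnum : PySem.Int.floordiv (ts.length : Int) (l : Int) = ((ts.length / l : Nat) : Int) :=
      PySem.Int.floordiv_natCast _ _
    refine Prod.ext ?_ ?_
    · rw [packRec_fst l hl ts, hnum, PySem.List.pyRange_zero_nat]
      simp only [List.map_map]
      apply List.map_congr_left
      intro k _
      simp only [Function.comp_apply]
      rw [pvChunkSlice ts l k]
      simp [pvWrap]
    · rw [packRec_snd l hl ts, hnum]
      have h := Nat.div_add_mod ts.length l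
      have hcast : ((ts.length / l : Nat) : Int) * ((l : Nat) : Int) = ((ts.length / l * l : Nat) : Int) := by
        push_cast; ring
      rw [hcast]
      dsimp only
      rw [← Nat.cast_sub (Nat.div_mul_le_self _ _)]
      rw [Nat.sub_eq_of_eq_add (Nat.mod_add_div' ts.length l).symm]
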